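-- pv_equiv track=rewrite | github.com/openstenoproject/plover | plover/formatting.py | _lower_nowhitespace
-- ===== SOURCE A (Python) =====
-- def _lower_nowhitespace(s):
--     """Lowercase the first letter of s (ignoring spaces)."""
--     word_list = s.split(' ')
--     final_list = []
--     first_word = True
--     for word in word_list:
--         if len(word) > 0:
--             if first_word is True:
--                 word = word[0:1].lower() + word[1:]
--                 first_word = False
--         final_list.append(word)
--     return ' '.join(final_list)
-- ===== SOURCE B (Python) =====
-- def _lower_nowhitespace(s):
--     """Lowercase the first letter of s (ignoring spaces)."""
--     i = 0
--     n = len(s)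
--     while i < n and s[i] == ' ':
--         i += 1
--     if i == n:
--         return s
--     return s[:i] + s[i].lower() + s[i + 1:]
-- ===== Notes on version B (the rewrite author's own statement) =====
-- stated objective: simpler
-- what changed: Replaces the split-on-space / first-word-flag / rebuild-list / join pipeline with a single scan to the first non-space character, which is lowercased in place via one slice concatenation; no intermediate word list is built.
import Mathlib
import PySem

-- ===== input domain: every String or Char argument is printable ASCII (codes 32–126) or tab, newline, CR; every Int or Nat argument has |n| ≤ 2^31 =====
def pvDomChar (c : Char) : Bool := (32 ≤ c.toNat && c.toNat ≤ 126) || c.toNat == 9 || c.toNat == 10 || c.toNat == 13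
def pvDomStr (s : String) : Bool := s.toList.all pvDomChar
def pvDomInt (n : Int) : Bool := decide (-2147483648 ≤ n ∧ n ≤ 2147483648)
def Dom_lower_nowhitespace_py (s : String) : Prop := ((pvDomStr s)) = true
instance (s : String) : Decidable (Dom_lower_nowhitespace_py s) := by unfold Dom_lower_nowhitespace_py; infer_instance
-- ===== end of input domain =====

-- B replaces A's split-on-space / first-word-flag / rebuild / join pipeline by a single
-- scan to the first non-space character, lowercased in place (objective: simpler).


-- ===== PORT A =====
-- one loop step of A: append word (lowercasing word[0:1] when it is the first non-empty word)
def pyAStep (st : List (List Char) × Bool) (word : List Char) : List (List Char) × Bool :=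
  if 0 < word.length then
    if st.2 = true then
      (st.1 ++ [PySem.Chars.lower (PySem.Chars.slice word (some 0) (some 1)) ++
                PySem.Chars.slice word (some 1) none], false)
    else (st.1 ++ [word], st.2)
  else (st.1 ++ [word], st.2)

def lower_nowhitespace_py (s : String) : String :=
  let word_list := PySem.Chars.splitOn s.toList [' ']
  let r := word_list.foldl pyAStep ([], true)
  String.ofList (PySem.Chars.join [' '] r.1)

-- ===== PORT B =====
-- scan past leading spaces; at the first non-space character, lowercase it and keep the rest
def pyBScan : List Char → List Char
  | [] => []
  | c :: cs => if c = ' ' then c :: pyBScan cs else PySem.Chars.lowerChar c :: cs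

def lower_nowhitespace_py_alt (s : String) : String := String.ofList (pyBScan s.toList)

-- ===== PRECONDITION & SPEC =====
def Spec_lower_nowhitespace_py (s : String) (out : String) : Prop := out = lower_nowhitespace_py_alt s
instance (s : String) (out : String) : Decidable (Spec_lower_nowhitespace_py s out) := by unfold Spec_lower_nowhitespace_py; infer_instance

-- ===== CLAIM (what is proved, stated in full; the proofs are below) =====
def Claim_equal_lower_nowhitespace_py : Prop := ∀ (s : String), Dom_lower_nowhitespace_py s → Spec_lower_nowhitespace_py s (lower_nowhitespace_py s)

-- ===== LEMMAS AND PROOFS =====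

-- structural characterization of A's split(' ')
def split1 : List Char → List Char → List (List Char)
  | [], cur => [cur.reverse]
  | c :: cs, cur => if c = ' ' then cur.reverse :: split1 cs [] else split1 cs (c :: cur)

theorem split1_nil (cur : List Char) : split1 [] cur = [cur.reverse] := rfl

theorem split1_cons (c : Char) (cs cur : List Char) :
    split1 (c :: cs) cur = if c = ' ' then cur.reverse :: split1 cs [] else split1 cs (c :: cur) := rfl

theorem go_eq : ∀ (fuel : Nat) (l cur : List Char) (acc : List (List Char)),
    l.length < fuel →
    PySem.Chars.splitOn.go [' '] fuel l cur acc = acc.reverse ++ split1 l cur := by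
  intro fuel
  induction fuel with
  | zero => intro l cur acc h; omega
  | succ fuel ih =>
    intro l cur acc h
    cases l with
    | nil =>
      rw [show PySem.Chars.splitOn.go [' '] (fuel+1) [] cur acc
            = (cur.reverse :: acc).reverse from rfl, split1_nil]
      simp
    | cons c rest =>
      by_cases hc : c = ' '
      · subst hc
        simp only [PySem.Chars.splitOn.go, List.isPrefixOf, Bool.and_true, beq_self_eq_true,
          if_pos, List.length_cons, List.drop_succ_cons, List.length_nil, List.drop_zero]
        rw [ih rest [] (cur.reverse :: acc) (by simpa using Nat.lt_of_succ_lt_succ h)]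
        rw [split1_cons, if_pos rfl]
        simp only [List.reverse_cons, List.append_assoc, List.singleton_append]
      · simp only [PySem.Chars.splitOn.go, List.isPrefixOf, Bool.and_true]
        rw [if_neg (by simp only [beq_iff_eq]; exact fun h => hc h.symm)]
        rw [ih rest (c :: cur) acc (by simpa using Nat.lt_of_succ_lt_succ h)]
        rw [split1_cons, if_neg hc]

theorem splitOn_eq (l : List Char) : PySem.Chars.splitOn l [' '] = split1 l [] := by
  show PySem.Chars.splitOn.go [' '] (l.length + 1) l [] [] = split1 l []
  rw [go_eq (l.length + 1) l [] [] (Nat.lt_succ_self _)]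
  simp

-- shifting the accumulated current word into the head of the result
theorem split1_cur : ∀ (cs cur : List Char),
    split1 cs cur = (cur.reverse ++ (split1 cs []).headI) :: (split1 cs []).tail := by
  intro cs
  induction cs with
  | nil => intro cur; simp [split1_nil]
  | cons c cs ih =>
    intro cur
    by_cases hc : c = ' '
    · subst hc
      rw [split1_cons, if_pos rfl, split1_cons, if_pos rfl]
      simp
    · rw [split1_cons, if_neg hc, split1_cons, if_neg hc]
      rw [ih (c :: cur), ih [c]]
      simp

theorem split1_head_tail (cs : List Char) :
    split1 cs [] = (split1 cs []).headI :: (split1 cs []).tail := by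
  have := split1_cur cs []
  simpa using this

theorem join_cons_head (sep c : Char) (h : List Char) (t : List (List Char)) :
    PySem.Chars.join [sep] ((c :: h) :: t) = c :: PySem.Chars.join [sep] (h :: t) := by
  cases t with
  | nil => simp [PySem.Chars.join, List.intercalate]
  | cons b t' => simp [PySem.Chars.join, List.intercalate]

theorem join_nil_cons (sep : Char) (b : List Char) (t : List (List Char)) :
    PySem.Chars.join [sep] ([] :: b :: t) = sep :: PySem.Chars.join [sep] (b :: t) := by
  simp [PySem.Chars.join, List.intercalate]

theorem join_split1 : ∀ (cs : List Char), PySem.Chars.join [' '] (split1 cs []) = cs := by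
  intro cs
  induction cs with
  | nil => simp [split1_nil, PySem.Chars.join, List.intercalate]
  | cons c cs ih =>
    by_cases hc : c = ' '
    · subst hc
      rw [split1_cons, if_pos rfl, List.reverse_nil, split1_head_tail cs, join_nil_cons,
          ← split1_head_tail cs, ih]
    · rw [split1_cons, if_neg hc, split1_cur cs [c]]
      simp only [List.reverse_cons, List.reverse_nil, List.nil_append, List.cons_append]
      rw [join_cons_head, ← split1_head_tail cs, ih]

-- the fold's accumulator is a pure append
theorem fold_acc : ∀ (pieces : List (List Char)) (a : List (List Char)) (flag : Bool),
    pieces.foldl pyAStep (a, flag)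
      = (a ++ (pieces.foldl pyAStep ([], flag)).1, (pieces.foldl pyAStep ([], flag)).2) := by
  intro pieces
  induction pieces with
  | nil => intro a flag; simp
  | cons w ws ih =>
    intro a flag
    simp only [List.foldl_cons]
    rw [ih (pyAStep (a, flag) w).1 (pyAStep (a, flag) w).2,
        ih (pyAStep ([], flag) w).1 (pyAStep ([], flag) w).2]
    unfold pyAStep
    split_ifs <;> simp_all

theorem fold_false : ∀ (pieces : List (List Char)) (a : List (List Char)),
    pieces.foldl pyAStep (a, false) = (a ++ pieces, false) := by
  intro pieces
  induction pieces with
  | nil => intro a; simp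
  | cons w ws ih => intro a; simp only [List.foldl_cons, pyAStep]; split_ifs <;> simp_all

-- what the flag-loop does: lowercase the head of the first non-empty piece
def procFirst : List (List Char) → List (List Char)
  | [] => []
  | w :: ws => if 0 < w.length
      then (PySem.Chars.lower (PySem.Chars.slice w (some 0) (some 1)) ++
            PySem.Chars.slice w (some 1) none) :: ws
      else w :: procFirst ws

theorem fold_eq_procFirst : ∀ (pieces : List (List Char)),
    (pieces.foldl pyAStep ([], true)).1 = procFirst pieces := by
  intro pieces
  induction pieces with
  | nil => simp [procFirst]
  | cons w ws ih =>
    by_cases hw : 0 < w.length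
    · simp only [List.foldl_cons]
      rw [show pyAStep ([], true) w
            = ([PySem.Chars.lower (PySem.Chars.slice w (some 0) (some 1)) ++
                PySem.Chars.slice w (some 1) none], false) by
          simp [pyAStep, hw]]
      rw [fold_false]
      simp [procFirst, hw]
    · simp only [List.foldl_cons]
      rw [show pyAStep ([], true) w = ([w], true) by simp [pyAStep, hw]]
      rw [fold_acc ws [w] true, ih]
      simp [procFirst, hw]

theorem slice_head (c : Char) (h : List Char) :
    PySem.Chars.lower (PySem.Chars.slice (c :: h) (some 0) (some 1)) ++
      PySem.Chars.slice (c :: h) (some 1) none = PySem.Chars.lowerChar c :: h := by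
  rw [show PySem.Chars.slice (c :: h) (some 0) (some 1) = [c] by
        simp only [PySem.Chars.slice]
        rw [PySem.List.slice_toNat _ (by norm_num) (by norm_num)]; simp,
      show PySem.Chars.slice (c :: h) (some 1) none = h by
        simp only [PySem.Chars.slice]
        rw [PySem.List.slice_from _ (by norm_num)]; simp]
  simp [PySem.Chars.lower]

theorem main_eq : ∀ (cs : List Char),
    PySem.Chars.join [' '] (procFirst (split1 cs [])) = pyBScan cs := by
  intro cs
  induction cs with
  | nil => simp [split1_nil, procFirst, pyBScan, PySem.Chars.join, List.intercalate]
  | cons c cs ih =>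
    by_cases hc : c = ' '
    · subst hc
      rw [split1_cons, if_pos rfl, List.reverse_nil]
      rw [show pyBScan (' ' :: cs) = ' ' :: pyBScan cs by simp [pyBScan]]
      rw [split1_head_tail cs]
      rw [show procFirst (([] : List Char) :: (split1 cs []).headI :: (split1 cs []).tail)
            = [] :: procFirst ((split1 cs []).headI :: (split1 cs []).tail) by
          simp [procFirst]]
      have hpf : procFirst ((split1 cs []).headI :: (split1 cs []).tail)
          = (procFirst ((split1 cs []).headI :: (split1 cs []).tail)).headI
            :: (procFirst ((split1 cs []).headI :: (split1 cs []).tail)).tail := by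
        rw [procFirst]; split_ifs <;> simp
      rw [hpf, join_nil_cons, ← hpf, ← split1_head_tail cs, ih]
    · rw [split1_cons, if_neg hc]
      rw [show pyBScan (c :: cs) = PySem.Chars.lowerChar c :: cs by simp [pyBScan, hc]]
      rw [split1_cur cs [c]]
      simp only [List.reverse_cons, List.reverse_nil, List.nil_append, List.cons_append]
      rw [show procFirst ((c :: (split1 cs []).headI) :: (split1 cs []).tail)
            = (PySem.Chars.lowerChar c :: (split1 cs []).headI) :: (split1 cs []).tail by
          rw [procFirst]; rw [if_pos (by simp)]; rw [slice_head]]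
      rw [join_cons_head, ← split1_head_tail cs, join_split1 cs]

-- ===== VERDICT (by name: the statement is the Claim_ definition above) =====
theorem lower_nowhitespace_py_spec : Claim_equal_lower_nowhitespace_py := by
  intro s _
  show lower_nowhitespace_py s = lower_nowhitespace_py_alt s
  rw [show lower_nowhitespace_py s
        = String.ofList (PySem.Chars.join [' ']
            ((PySem.Chars.splitOn s.toList [' ']).foldl pyAStep ([], true)).1) from rfl,
      show lower_nowhitespace_py_alt s = String.ofList (pyBScan s.toList) from rfl,
      splitOn_eq, fold_eq_procFirst, main_eq]
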